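-- pv_equiv track=rewrite | github.com/prosis369/Data-Structures | absolute_difference_array.py | max_absolute_difference
-- ===== SOURCE A (Python) =====
-- def max_absolute_difference(arr, n):
-- 	m = 0
-- 	for i in range(1,n-1):
-- 		ele = arr[i]
-- 		count_l = 0
-- 		count_r = 0
-- 		for j in range(i):
-- 			if arr[j]>ele:
-- 				count_l+=1
-- 		for k in range(i+1,n):
-- 			if arr[k]<ele:
-- 				count_r+=1
-- 		m_i = abs(count_r-count_l)
-- 		if m_i>m:
-- 			m = m_i
--
-- 	return m
-- ===== SOURCE B (Python) =====
-- # B: maintain a sorted prefix and a sorted suffix; each count is a binary search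
-- # (hand-written bisect_left/bisect_right clones, since A imports nothing).
-- def _bisect_left(s, x):
--     lo, hi = 0, len(s)
--     while lo < hi:
--         mid = (lo + hi) // 2
--         if s[mid] < x:
--             lo = mid + 1
--         else:
--             hi = mid
--     return lo
--
-- def _bisect_right(s, x):
--     lo, hi = 0, len(s)
--     while lo < hi:
--         mid = (lo + hi) // 2
--         if x < s[mid]:
--             hi = mid
--         else:
--             lo = mid + 1
--     return lo
--
-- def max_absolute_difference(arr, n):
--     if n <= 2:
--         return 0
--     a = arr[:n]
--     left = [a[0]]            # sorted copy of a[:i]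
--     right = sorted(a[2:])    # sorted copy of a[i+1:]
--     m = 0
--     for i in range(1, n - 1):
--         ele = a[i]
--         cl = i - _bisect_right(left, ele)   # earlier elements > ele
--         cr = _bisect_left(right, ele)       # later elements < ele
--         d = cr - cl
--         if d < 0:
--             d = -d
--         if d > m:
--             m = d
--         left.insert(_bisect_right(left, ele), ele)
--         del right[_bisect_left(right, a[i + 1])]
--     return m
-- ===== Notes on version B (the rewrite author's own statement) =====
-- stated objective: faster
-- what changed: A rescans the whole prefix and suffix for every index (O(n^2)); B maintains a sorted copy of the prefix and of the suffix and gets each count by binary search (insertion-based updates, O(n log n) comparisons).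
import Mathlib
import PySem

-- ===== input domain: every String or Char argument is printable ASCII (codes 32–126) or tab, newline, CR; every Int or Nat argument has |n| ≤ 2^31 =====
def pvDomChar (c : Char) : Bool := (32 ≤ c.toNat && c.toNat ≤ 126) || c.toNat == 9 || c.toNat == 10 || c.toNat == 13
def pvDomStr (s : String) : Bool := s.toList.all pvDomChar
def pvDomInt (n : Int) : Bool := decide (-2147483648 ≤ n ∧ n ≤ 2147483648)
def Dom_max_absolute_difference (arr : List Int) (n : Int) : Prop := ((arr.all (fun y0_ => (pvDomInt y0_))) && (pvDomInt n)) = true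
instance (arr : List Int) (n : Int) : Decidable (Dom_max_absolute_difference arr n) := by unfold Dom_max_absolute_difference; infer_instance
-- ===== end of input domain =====

-- B replaces A's per-element rescans by a maintained sorted prefix / sorted suffix
-- queried with binary search (objective: faster; measured on the timing inputs).

-- ===== PORT A =====
def max_absolute_difference (arr : List Int) (n : Int) : Int :=
  (PySem.List.pyRange 1 (n - 1) 1).foldl (fun m i =>
    let ele := PySem.List.pyGetD arr i 0
    let count_l : Int := (PySem.List.pyRange 0 i 1).foldl
      (fun c j => if PySem.List.pyGetD arr j 0 > ele then c + 1 else c) 0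
    let count_r : Int := (PySem.List.pyRange (i + 1) n 1).foldl
      (fun c k => if PySem.List.pyGetD arr k 0 < ele then c + 1 else c) 0
    let m_i := |count_r - count_l|
    if m_i > m then m_i else m) 0

-- ===== PORT B =====
-- Source B's hand-written _bisect_left/_bisect_right are exactly bisect.bisect_left/bisect_right,
-- ported as PySem.List.bisectLeft/bisectRight; `del right[j]` (j always in range here) is eraseIdx.
def max_absolute_difference_alt (arr : List Int) (n : Int) : Int :=
  if n ≤ 2 then 0 else
  let a := PySem.List.slice arr none (some n)
  let left : List Int := [PySem.List.pyGetD a 0 0]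
  let right : List Int := PySem.List.sorted (PySem.List.slice a (some 2) none) (fun x => x) false
  ((PySem.List.pyRange 1 (n - 1) 1).foldl (fun s i =>
      let ele := PySem.List.pyGetD a i 0
      let cl : Int := i - (PySem.List.bisectRight s.2.1 ele : Int)
      let cr : Int := (PySem.List.bisectLeft s.2.2 ele : Int)
      let d := cr - cl
      let d := if d < 0 then -d else d
      let m := if d > s.1 then d else s.1
      let left' := PySem.List.insert s.2.1 ((PySem.List.bisectRight s.2.1 ele : Nat) : Int) ele
      let right' := s.2.2.eraseIdx (PySem.List.bisectLeft s.2.2 (PySem.List.pyGetD a (i + 1) 0))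
      (m, left', right')) ((0 : Int), left, right)).1

-- ===== PRECONDITION & SPEC =====
-- Pre_ excludes exactly the inputs where A raises IndexError: 2 < n with n > len(arr)
-- (for n ≤ 2 the loop body never runs and A returns 0 on any arr).
def Pre_max_absolute_difference (arr : List Int) (n : Int) : Prop := 2 < n → n ≤ (arr.length : Int)
instance (arr : List Int) (n : Int) : Decidable (Pre_max_absolute_difference arr n) := by unfold Pre_max_absolute_difference; infer_instance
def pvWitness_max_absolute_difference : List Int × Int := ([1, 5, 2, 4, 3], 5)
def Spec_max_absolute_difference (arr : List Int) (n : Int) (out : Int) : Prop := out = max_absolute_difference_alt arr n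
instance (arr : List Int) (n : Int) (out : Int) : Decidable (Spec_max_absolute_difference arr n out) := by unfold Spec_max_absolute_difference; infer_instance

-- ===== CLAIM (what is proved, stated in full; the proofs are below) =====
def Claim_equal_max_absolute_difference : Prop := ∀ (arr : List Int) (n : Int), Dom_max_absolute_difference arr n → Pre_max_absolute_difference arr n → Spec_max_absolute_difference arr n (max_absolute_difference arr n)

-- ===== LEMMAS AND PROOFS =====

-- The per-index value both loops compute: counts over the prefix / suffix of a = arr[:n].
def pvSpecStep (a : List Int) (m i : Int) : Int :=
  let ele := PySem.List.pyGetD a i 0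
  let cl : Int := ((a.take i.toNat).countP (fun y => decide (y > ele)) : Int)
  let cr : Int := ((a.drop (i + 1).toNat).countP (fun y => decide (y < ele)) : Int)
  if |cr - cl| > m then |cr - cl| else m

-- a predicate true exactly before position r has countP r
theorem pv_count_split (s : List Int) (p : Int → Bool) (r : Nat) (hle : r ≤ s.length)
    (hlt : ∀ (j : Nat) (hj : j < s.length), j < r → p s[j] = true)
    (hgt : ∀ (j : Nat) (hj : j < s.length), r ≤ j → p s[j] = false) :
    s.countP p = r := by
  conv_lhs => rw [← List.take_append_drop r s]
  rw [List.countP_append]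
  have h1 : (s.take r).countP p = (s.take r).length := by
    apply List.countP_eq_length.mpr
    intro y hy
    obtain ⟨j, hj, rfl⟩ := List.mem_iff_getElem.mp hy
    have hjr : j < r := lt_of_lt_of_le hj (by simp [List.length_take])
    rw [List.getElem_take]
    exact hlt j (by omega) hjr
  have h2 : (s.drop r).countP p = 0 := by
    apply List.countP_eq_zero.mpr
    intro y hy
    obtain ⟨j, hj, rfl⟩ := List.mem_iff_getElem.mp hy
    rw [List.getElem_drop]
    simp only [List.length_drop] at hj
    simp [hgt (r + j) (by omega) (by omega)]
  rw [h1, h2, List.length_take]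
  omega

-- bisect_right on a sorted list counts the elements ≤ x
theorem pv_bisectRight_count (s : List Int) (x : Int) (hs : s.Pairwise (· ≤ ·)) :
    PySem.List.bisectRight s x = s.countP (fun y => decide (y ≤ x)) := by
  obtain ⟨hle, hlt, hgt⟩ := PySem.List.bisectRight_spec s x hs
  exact (pv_count_split s _ _ hle
    (fun j hj h => by simpa using hlt j hj h)
    (fun j hj h => by simpa using not_le.mpr (hgt j hj h))).symm

-- bisect_left on a sorted list counts the elements < x
theorem pv_bisectLeft_count (s : List Int) (x : Int) (hs : s.Pairwise (· ≤ ·)) :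
    PySem.List.bisectLeft s x = s.countP (fun y => decide (y < x)) := by
  obtain ⟨hle, hlt, hgt⟩ := PySem.List.bisectLeft_spec s x hs
  exact (pv_count_split s _ _ hle
    (fun j hj h => by simpa using hlt j hj h)
    (fun j hj h => by simpa using not_lt.mpr (hgt j hj h))).symm

theorem pv_count_le_add_count_gt (l : List Int) (x : Int) :
    (l.countP (fun y => decide (y ≤ x)) : Int) + (l.countP (fun y => decide (y > x)) : Int) = l.length := by
  induction l with
  | nil => simp
  | cons a t ih =>
    by_cases h : a ≤ x <;>
      simp only [List.countP_cons, gt_iff_lt] at ih ⊢ <;>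
      simp [h, not_le.mp, not_lt.mpr] <;> omega

-- insertion at bisect_right keeps the list sorted and adds the element
theorem pv_insort (s : List Int) (x : Int) (hs : s.Pairwise (· ≤ ·)) :
    (PySem.List.insert s ((PySem.List.bisectRight s x : Nat) : Int) x).Pairwise (· ≤ ·) ∧
    (PySem.List.insert s ((PySem.List.bisectRight s x : Nat) : Int) x).Perm (x :: s) := by
  obtain ⟨hle, hlt, hgt⟩ := PySem.List.bisectRight_spec s x hs
  rw [PySem.List.insert_natCast s _ x hle]
  constructor
  · rw [List.pairwise_append]
    refine ⟨hs.sublist (List.take_sublist _ _), ?_, ?_⟩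
    · rw [List.pairwise_cons]
      refine ⟨?_, hs.sublist (List.drop_sublist _ _)⟩
      intro y hy
      obtain ⟨j, hj, rfl⟩ := List.mem_iff_getElem.mp hy
      rw [List.getElem_drop]
      exact le_of_lt (hgt _ (by simp only [List.length_drop] at hj; omega) (by omega))
    · intro u hu v hv
      obtain ⟨j, hj, rfl⟩ := List.mem_iff_getElem.mp hu
      have hjr : j < PySem.List.bisectRight s x :=
        lt_of_lt_of_le hj (by simp [List.length_take])
      rw [List.getElem_take]
      have hux : s[j] ≤ x := hlt j (by omega) hjr
      rcases List.mem_cons.mp hv with rfl | hv'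
      · exact hux
      · obtain ⟨j', hj', rfl⟩ := List.mem_iff_getElem.mp hv'
        rw [List.getElem_drop]
        exact le_trans hux (le_of_lt (hgt _ (by simp only [List.length_drop] at hj'; omega) (by omega)))
  · exact (List.perm_middle).trans (by rw [List.take_append_drop])

-- deletion at bisect_left of a present element removes exactly one copy of it
theorem pv_erase_bisect (s : List Int) (x : Int) (hs : s.Pairwise (· ≤ ·)) (hx : x ∈ s) :
    s.Perm (x :: s.eraseIdx (PySem.List.bisectLeft s x)) ∧
    (s.eraseIdx (PySem.List.bisectLeft s x)).Pairwise (· ≤ ·) := by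
  obtain ⟨hle, hlt, hgt⟩ := PySem.List.bisectLeft_spec s x hs
  obtain ⟨k, hk, hks⟩ := List.mem_iff_getElem.mp hx
  have hjk : PySem.List.bisectLeft s x ≤ k := by
    by_contra h
    exact absurd (hks ▸ hlt k hk (by omega)) (lt_irrefl x)
  have hj : PySem.List.bisectLeft s x < s.length := by omega
  have hsx : s[PySem.List.bisectLeft s x] = x := by
    refine le_antisymm ?_ (hgt _ hj le_rfl)
    rcases Nat.eq_or_lt_of_le hjk with h | h
    · simp [h, hks]
    · exact le_trans (List.pairwise_iff_getElem.mp hs _ k hj hk h) (le_of_eq hks)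
  constructor
  · rw [List.eraseIdx_eq_take_drop_succ]
    conv_lhs => rw [← List.take_append_drop (PySem.List.bisectLeft s x) s,
      ← List.getElem_cons_drop hj, hsx]
    exact List.perm_middle
  · exact hs.sublist (List.eraseIdx_sublist _ _)

-- A's inner left loop is a countP over the prefix
theorem pv_countA_l (arr : List Int) (ele : Int) (i : Int) (h0 : 0 ≤ i) (hi : i ≤ (arr.length : Int)) :
    (PySem.List.pyRange 0 i 1).foldl (fun c j => if PySem.List.pyGetD arr j 0 > ele then c + 1 else c) (0 : Int)
      = ((arr.take i.toNat).countP (fun y => decide (y > ele)) : Int) := by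
  have hlt : ((arr.take i.toNat).length : Int) = i := by
    simp only [List.length_take]
    omega
  conv_lhs => rw [← hlt]
  rw [PySem.List.foldl_congr_mem _ _
      (fun c j => if PySem.List.pyGetD (arr.take i.toNat) j 0 > ele then c + 1 else c) _ ?_]
  · rw [PySem.List.foldl_pyRange_pyGetD' (arr.take i.toNat) 0
      (fun c y => if y > ele then c + 1 else c) 0 le_rfl]
    simp only [Int.toNat_zero, List.drop_zero]
    rw [PySem.List.foldl_ite_add_one (fun y => y > ele)]
    simp
  · intro c j hm
    obtain ⟨h1, h2⟩ := (PySem.List.mem_pyRange_one).mp hm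
    have hjl : j < ((arr.take i.toNat).length : Int) := by omega
    have hjl' : j < (arr.length : Int) := by
      simp only [List.length_take] at hjl ⊢
      omega
    simp only []
    rw [PySem.List.pyGetD_eq_getElem _ _ h1 hjl', PySem.List.pyGetD_eq_getElem _ _ h1 hjl,
      List.getElem_take]

-- A's inner right loop is a countP over the suffix
theorem pv_countA_r (a : List Int) (ele : Int) (i n : Int) (h0 : 0 ≤ i + 1) (hn : (a.length : Int) = n) :
    (PySem.List.pyRange (i + 1) n 1).foldl (fun c k => if PySem.List.pyGetD a k 0 < ele then c + 1 else c) (0 : Int)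
      = ((a.drop (i + 1).toNat).countP (fun y => decide (y < ele)) : Int) := by
  subst hn
  rw [PySem.List.foldl_pyRange_pyGetD' a 0 (fun c y => if y < ele then c + 1 else c) 0 h0]
  rw [PySem.List.foldl_ite_add_one (fun y => y < ele)]
  simp

-- the main loop of B, with its sorted-prefix/sorted-suffix invariant
theorem pv_loop (a : List Int) (n : Int) (hn : (a.length : Int) = n) :
    ∀ (k : Nat) (i : Int) (m : Int) (left right : List Int),
      1 ≤ i → i + k = n - 1 →
      left.Pairwise (· ≤ ·) → left.Perm (a.take i.toNat) →
      right.Pairwise (· ≤ ·) → right.Perm (a.drop (i + 1).toNat) →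
      ((PySem.List.pyRange i (n - 1) 1).foldl (fun s i =>
        let ele := PySem.List.pyGetD a i 0
        let cl : Int := i - (PySem.List.bisectRight s.2.1 ele : Int)
        let cr : Int := (PySem.List.bisectLeft s.2.2 ele : Int)
        let d := cr - cl
        let d := if d < 0 then -d else d
        let m := if d > s.1 then d else s.1
        let left' := PySem.List.insert s.2.1 ((PySem.List.bisectRight s.2.1 ele : Nat) : Int) ele
        let right' := s.2.2.eraseIdx (PySem.List.bisectLeft s.2.2 (PySem.List.pyGetD a (i + 1) 0))
        (m, left', right')) (m, left, right)).1
      = (PySem.List.pyRange i (n - 1) 1).foldl (pvSpecStep a) m := by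
  intro k
  induction k with
  | zero =>
    intro i m left right h1 hk _ _ _ _
    rw [PySem.List.pyRange_one_eq_nil (by omega)]
    rfl
  | succ k ih =>
    intro i m left right h1 hk hl hpl hr hpr
    have hilt : i < n - 1 := by omega
    have h0i : (0 : Int) ≤ i := by omega
    have hiN : i < (a.length : Int) := by omega
    have hi1N : i + 1 < (a.length : Int) := by omega
    have hiN' : i.toNat < a.length := by omega
    have hi1N' : (i + 1).toNat < a.length := by omega
    set ele := PySem.List.pyGetD a i 0 with hele_def
    have hele : ele = a[i.toNat] := PySem.List.pyGetD_eq_getElem a 0 h0i hiN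
    have hele1 : PySem.List.pyGetD a (i + 1) 0 = a[(i + 1).toNat] :=
      PySem.List.pyGetD_eq_getElem a 0 (by omega) hi1N
    -- count equalities
    have hcl : i - (PySem.List.bisectRight left ele : Int)
        = ((a.take i.toNat).countP (fun y => decide (y > ele)) : Int) := by
      rw [pv_bisectRight_count left ele hl, hpl.countP_eq]
      have hsplit := pv_count_le_add_count_gt (a.take i.toNat) ele
      have hlen : ((a.take i.toNat).length : Int) = i := by
        simp only [List.length_take]
        omega
      omega
    have hcr : (PySem.List.bisectLeft right ele : Int)
        = ((a.drop (i + 1).toNat).countP (fun y => decide (y < ele)) : Int) := by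
      rw [pv_bisectLeft_count right ele hr, hpr.countP_eq]
    -- suffix head
    have hdrop : a.drop (i + 1).toNat = a[(i + 1).toNat] :: a.drop ((i + 1).toNat + 1) :=
      (List.getElem_cons_drop hi1N').symm
    have hx' : a[(i + 1).toNat] ∈ right := by
      rw [hpr.mem_iff, hdrop]
      exact List.mem_cons_self
    obtain ⟨hperm_r, hsort_r⟩ := pv_erase_bisect right a[(i + 1).toNat] hr hx'
    obtain ⟨hsort_l, hperm_l⟩ := pv_insort left ele hl
    -- updated invariants
    have hplnew : (PySem.List.insert left ((PySem.List.bisectRight left ele : Nat) : Int) ele).Perm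
        (a.take (i + 1).toNat) := by
      have h2 : (i + 1).toNat = i.toNat + 1 := by omega
      rw [h2, List.take_add_one, List.getElem?_eq_getElem hiN']
      simp only [Option.toList_some]
      refine hperm_l.trans ((hpl.cons ele).trans ?_)
      rw [← hele]
      exact (List.perm_append_singleton ele _).symm
    have hprnew : (right.eraseIdx (PySem.List.bisectLeft right (PySem.List.pyGetD a (i + 1) 0))).Perm
        (a.drop ((i + 1) + 1).toNat) := by
      rw [hele1]
      have h2 : ((i + 1) + 1).toNat = (i + 1).toNat + 1 := by omega
      rw [h2]
      exact (hperm_r.symm.trans (hpr.trans (by rw [hdrop]))).cons_inv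
    have hsort_l' : (PySem.List.insert left ((PySem.List.bisectRight left ele : Nat) : Int) ele).Pairwise (· ≤ ·) := hsort_l
    have hsort_r' : (right.eraseIdx (PySem.List.bisectLeft right (PySem.List.pyGetD a (i + 1) 0))).Pairwise (· ≤ ·) := by
      rw [hele1]
      exact hsort_r
    have habs : ∀ d : Int, (if d < 0 then -d else d) = |d| := by
      intro d
      rcases lt_or_ge d 0 with h | h
      · rw [if_pos h, abs_of_neg h]
      · rw [if_neg (not_lt.mpr h), abs_of_nonneg h]
    rw [PySem.List.pyRange_one_cons hilt]
    simp only [List.foldl_cons]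
    refine (ih (i + 1) _ _ _ (by omega) (by omega) hsort_l' hplnew hsort_r' hprnew).trans ?_
    congr 1
    simp only [pvSpecStep, ← hele_def]
    rw [hcl, hcr, habs]

-- A's fold equals the spec fold over a = arr[:n]
theorem pv_Afold (arr : List Int) (n : Int) (h3 : 2 < n) (hlen : n ≤ (arr.length : Int)) :
    max_absolute_difference arr n
      = (PySem.List.pyRange 1 (n - 1) 1).foldl (pvSpecStep (arr.take n.toNat)) 0 := by
  unfold max_absolute_difference
  apply PySem.List.foldl_congr_mem
  intro m i hm
  obtain ⟨h1, h2⟩ := PySem.List.mem_pyRange_one.mp hm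
  have h0 : (0 : Int) ≤ i := by omega
  have hina : i < (arr.length : Int) := by omega
  have hget : ∀ k : Int, 0 ≤ k → k < n → PySem.List.pyGetD arr k 0 = PySem.List.pyGetD (arr.take n.toNat) k 0 := by
    intro k hk hkn
    have hklen : k < ((arr.take n.toNat).length : Int) := by
      simp only [List.length_take]
      omega
    rw [PySem.List.pyGetD_eq_getElem _ _ hk (by omega), PySem.List.pyGetD_eq_getElem _ _ hk hklen,
      List.getElem_take]
  simp only [pvSpecStep]
  rw [hget i h0 (by omega)]
  rw [pv_countA_l arr _ i h0 (by omega)]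
  rw [PySem.List.foldl_congr_mem _ _
      (fun c k => if PySem.List.pyGetD (arr.take n.toNat) k 0 < PySem.List.pyGetD (arr.take n.toNat) i 0 then c + 1 else c) _ ?_]
  · rw [pv_countA_r (arr.take n.toNat) _ i n (by omega)
      (by simp only [List.length_take]; omega)]
    rw [show arr.take i.toNat = (arr.take n.toNat).take i.toNat by
      rw [List.take_take]
      congr 1
      omega]
  · intro c k hk
    obtain ⟨hk1, hk2⟩ := PySem.List.mem_pyRange_one.mp hk
    simp only []
    rw [hget k (by omega) (by omega)]

-- ===== VERDICT (by name: the statement is the Claim_ definition above) =====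
theorem max_absolute_difference_spec : Claim_equal_max_absolute_difference := by
  intro arr n _ hpre
  unfold Spec_max_absolute_difference
  by_cases hn2 : n ≤ 2
  · unfold max_absolute_difference max_absolute_difference_alt
    rw [if_pos hn2, PySem.List.pyRange_one_eq_nil (by omega)]
    rfl
  · have h3 : 2 < n := by omega
    have hlen : n ≤ (arr.length : Int) := hpre h3
    rw [pv_Afold arr n h3 hlen]
    unfold max_absolute_difference_alt
    rw [if_neg hn2]
    rw [PySem.List.slice_to arr (by omega : (0:Int) ≤ n)]
    set a := arr.take n.toNat with ha
    have hna : (a.length : Int) = n := by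
      simp only [ha, List.length_take]
      omega
    have hN3 : 3 ≤ a.length := by omega
    have h0N : 0 < a.length := by omega
    clear_value a
    have htake1 : a.take (1 : Int).toNat = [PySem.List.pyGetD a 0 0] := by
      rw [PySem.List.pyGetD_eq_getElem a 0 le_rfl (by omega)]
      cases a with
      | nil => simp at h0N
      | cons x t => simp
    have hdrop2 : a.drop ((1 : Int) + 1).toNat = PySem.List.slice a (some 2) none := by
      rw [PySem.List.slice_from a (by omega : (0:Int) ≤ 2)]
      norm_num
    rw [pv_loop a n hna (n - 2).toNat 1 0
      [PySem.List.pyGetD a 0 0]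
      (PySem.List.sorted (PySem.List.slice a (some 2) none) (fun x => x) false)
      le_rfl (by omega)
      (List.pairwise_singleton _ _)
      (by rw [htake1])
      (by simpa using PySem.List.sorted_pairwise (PySem.List.slice a (some 2) none) (fun x => x))
      (by rw [hdrop2]; exact PySem.List.sorted_perm _ _ _)]
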